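-- pv_equiv track=rewrite | github.com/NJAPe/advent-of-code-2018 | advent_of_code/puzzle_18.py | count_acres
-- ===== SOURCE A (Python) =====
-- OPEN = "."
--
-- TREE = "|"
--
-- def count_acres(area):
--     num_open, num_trees, num_lumberyards = 0, 0, 0
--     for line in area:
--         for acre in line:
--             if acre == OPEN:
--                 num_open += 1
--             elif acre == TREE:
--                 num_trees += 1
--             else:
--                 num_lumberyards += 1
--     return num_lumberyards, num_open, num_trees
-- ===== SOURCE B (Python) =====
-- OPEN = "."
--
-- TREE = "|"
--
-- def count_acres(area):
--     acres = [acre for line in area for acre in line]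
--     num_open = acres.count(OPEN)
--     num_trees = acres.count(TREE)
--     return len(acres) - num_open - num_trees, num_open, num_trees
-- ===== Notes on version B (the rewrite author's own statement) =====
-- stated objective: idiomatic
-- what changed: Replaces the hand-rolled three-counter branch loop with flattening plus list.count for open and tree cells, deriving lumberyards as total length minus the two counts.
import Mathlib
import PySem

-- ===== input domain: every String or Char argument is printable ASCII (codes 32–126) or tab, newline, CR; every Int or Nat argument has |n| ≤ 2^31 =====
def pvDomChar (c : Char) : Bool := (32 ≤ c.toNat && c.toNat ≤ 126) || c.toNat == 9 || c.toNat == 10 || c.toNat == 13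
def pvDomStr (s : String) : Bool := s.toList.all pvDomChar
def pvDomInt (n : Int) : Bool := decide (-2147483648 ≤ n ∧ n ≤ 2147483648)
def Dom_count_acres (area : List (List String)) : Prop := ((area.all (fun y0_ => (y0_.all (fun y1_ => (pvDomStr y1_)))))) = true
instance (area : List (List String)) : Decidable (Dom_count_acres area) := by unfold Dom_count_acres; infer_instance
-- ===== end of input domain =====

-- B replaces the three-counter branching loop by flatten + list.count (idiomatic, same cost).

-- ===== PORT A =====
-- state = (num_open, num_trees, num_lumberyards); returned as (lumberyards, open, trees)
def count_acres (area : List (List String)) : Int × Int × Int :=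
  let s : Int × Int × Int :=
    area.foldl (fun st line =>
      line.foldl (fun (st : Int × Int × Int) acre =>
        if acre = "." then (st.1 + 1, st.2.1, st.2.2)
        else if acre = "|" then (st.1, st.2.1 + 1, st.2.2)
        else (st.1, st.2.1, st.2.2 + 1)) st) (0, 0, 0)
  (s.2.2, s.1, s.2.1)

-- ===== PORT B =====
def count_acres_alt (area : List (List String)) : Int × Int × Int :=
  let acres := area.flatMap (fun line => line)
  let num_open := PySem.List.count acres "."
  let num_trees := PySem.List.count acres "|"
  ((acres.length : Int) - num_open - num_trees, num_open, num_trees)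

-- ===== PRECONDITION & SPEC =====
def Spec_count_acres (area : List (List String)) (out : Int × Int × Int) : Prop := out = count_acres_alt area
instance (area : List (List String)) (out : Int × Int × Int) : Decidable (Spec_count_acres area out) := by unfold Spec_count_acres; infer_instance

-- ===== CLAIM (what is proved, stated in full; the proofs are below) =====
def Claim_equal_count_acres : Prop := ∀ (area : List (List String)), Dom_count_acres area → Spec_count_acres area (count_acres area)

-- ===== LEMMAS AND PROOFS =====

-- the inner fold over one flat list, from an arbitrary start state
theorem count_fold_inner (l : List String) (st : Int × Int × Int) :
    l.foldl (fun (st : Int × Int × Int) acre =>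
        if acre = "." then (st.1 + 1, st.2.1, st.2.2)
        else if acre = "|" then (st.1, st.2.1 + 1, st.2.2)
        else (st.1, st.2.1, st.2.2 + 1)) st
      = (st.1 + PySem.List.count l ".", st.2.1 + PySem.List.count l "|",
         st.2.2 + ((l.length : Int) - PySem.List.count l "." - PySem.List.count l "|")) := by
  induction l generalizing st with
  | nil => simp [PySem.List.count]
  | cons a l ih =>
    by_cases h1 : a = "."
    · simp [h1, ih, PySem.List.count, List.count_cons, Prod.ext_iff]
      all_goals (push_cast; omega)
    · by_cases h2 : a = "|"
      · simp [h1, h2, ih, PySem.List.count, List.count_cons, Prod.ext_iff]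
        all_goals (push_cast; omega)
      · simp [h1, h2, ih, PySem.List.count, List.count_cons, Prod.ext_iff]
        all_goals (push_cast; omega)

theorem count_fold_outer (area : List (List String)) (st : Int × Int × Int) :
    area.foldl (fun st line =>
      line.foldl (fun (st : Int × Int × Int) acre =>
        if acre = "." then (st.1 + 1, st.2.1, st.2.2)
        else if acre = "|" then (st.1, st.2.1 + 1, st.2.2)
        else (st.1, st.2.1, st.2.2 + 1)) st) st
      = (let l := area.flatMap (fun line => line);
         (st.1 + PySem.List.count l ".", st.2.1 + PySem.List.count l "|",
          st.2.2 + ((l.length : Int) - PySem.List.count l "." - PySem.List.count l "|"))) := by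
  induction area generalizing st with
  | nil => simp [PySem.List.count]
  | cons line rest ih =>
    simp only [List.foldl_cons]
    rw [count_fold_inner, ih]
    simp [PySem.List.count, List.count_append, Prod.ext_iff, List.flatMap_cons]
    all_goals (push_cast; omega)

-- ===== VERDICT (by name: the statement is the Claim_ definition above) =====
theorem count_acres_spec : Claim_equal_count_acres := by
  intro area _
  unfold Spec_count_acres count_acres count_acres_alt
  simp only [count_fold_outer]
  simp
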